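-- pv_equiv track=rewrite | github.com/ljrkkaa/VLTL-Bench | dataset_generators/complex_LTL_dataset_generator.py | _fragment_patrol
-- ===== SOURCE A (Python) =====
-- from typing import Dict, List, Tuple, Callable
--
-- def _fragment_patrol(props: List[str]) -> str:
--     """Generate patrol mode: []<> (p1 && <> p2 && <> p3...)"""
--     if not props:
--         return ""
--     if len(props) == 1:
--         return f"globally ( finally {props[0]} )"
--
--     # Nested finally structure: p1 and finally (p2 and finally p3)
--     inner = props[-1]
--     for p in reversed(props[:-1]):
--         inner = f"( {p} and finally {inner} )"
--     return f"globally ( finally {inner} )"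
-- ===== SOURCE B (Python) =====
-- from typing import List
--
-- def _fragment_patrol(props: List[str]) -> str:
--     """Generate patrol mode: []<> (p1 && <> p2 && <> p3...)"""
--     if not props:
--         return ""
--     if len(props) == 1:
--         return f"globally ( finally {props[0]} )"
--     # Forward one-pass construction: opening pieces, last prop, then all closers.
--     inner = "".join(f"( {p} and finally " for p in props[:-1]) \
--             + props[-1] + " )" * (len(props) - 1)
--     return f"globally ( finally {inner} )"
-- ===== Notes on version B (the rewrite author's own statement) =====
-- stated objective: faster
-- what changed: Replaces the reversed right-fold accumulation (quadratic string rebuilding) with a single forward join of opening pieces plus the last prop plus repeated closers.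
import Mathlib
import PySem

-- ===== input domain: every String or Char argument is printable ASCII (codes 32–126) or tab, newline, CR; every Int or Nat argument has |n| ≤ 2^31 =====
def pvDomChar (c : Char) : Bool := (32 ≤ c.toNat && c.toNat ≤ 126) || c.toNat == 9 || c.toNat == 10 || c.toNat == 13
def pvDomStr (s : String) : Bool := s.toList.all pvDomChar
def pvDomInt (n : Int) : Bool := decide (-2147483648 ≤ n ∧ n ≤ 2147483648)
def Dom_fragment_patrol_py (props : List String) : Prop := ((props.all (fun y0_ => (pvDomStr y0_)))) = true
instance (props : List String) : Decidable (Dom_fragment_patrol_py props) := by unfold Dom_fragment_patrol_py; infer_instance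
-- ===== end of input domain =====

-- B replaces A's reversed right-fold accumulation with one forward join of
-- opening pieces + last prop + repeated closers (linear instead of quadratic rebuilding).


-- ===== PORT A =====
-- literal transliteration: inner = props[-1]; for p in reversed(props[:-1]): inner = "( p and finally inner )"
def fragment_patrol_py (props : List String) : String :=
  if props = [] then ""
  else if props.length = 1 then "globally ( finally " ++ (props.headD "") ++ " )"
  else
    let inner := ((PySem.List.pyGet? props (-1)).getD "")
    let inner := (PySem.List.slice props none (some (-1))).reverse.foldl
      (fun inner p => "( " ++ p ++ " and finally " ++ inner ++ " )") inner
    "globally ( finally " ++ inner ++ " )"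

-- ===== PORT B =====
-- " )" * k  (Python string repetition)
def pvClosers : Nat → String
  | 0 => ""
  | n + 1 => pvClosers n ++ " )"

def fragment_patrol_py_alt (props : List String) : String :=
  match props with
  | [] => ""
  | [p] => "globally ( finally " ++ p ++ " )"
  | _ =>
    let inner := String.join (props.dropLast.map (fun p => "( " ++ p ++ " and finally "))
      ++ ((PySem.List.pyGet? props (-1)).getD "") ++ pvClosers (props.length - 1)
    "globally ( finally " ++ inner ++ " )"

-- ===== PRECONDITION & SPEC =====
def Spec_fragment_patrol_py (props : List String) (out : String) : Prop := out = fragment_patrol_py_alt props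
instance (props : List String) (out : String) : Decidable (Spec_fragment_patrol_py props out) := by unfold Spec_fragment_patrol_py; infer_instance

-- ===== CLAIM (what is proved, stated in full; the proofs are below) =====
def Claim_equal_fragment_patrol_py : Prop := ∀ (props : List String), Dom_fragment_patrol_py props → Spec_fragment_patrol_py props (fragment_patrol_py props)

-- ===== LEMMAS AND PROOFS =====

-- String.join distributes over cons at the char level
theorem toList_foldl_append (init : String) (l : List String) :
    (l.foldl (fun r s => r ++ s) init).toList = init.toList ++ (l.map String.toList).flatten := by
  induction l generalizing init with
  | nil => simp
  | cons x xs ih => simp [ih, List.append_assoc]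

-- A's loop (foldl over the reversed init, seeded with the last element)
-- equals B's forward join + last + closers.
theorem fold_eq_join (props : List String) (h : props ≠ []) :
    props.dropLast.reverse.foldl
      (fun inner p => "( " ++ p ++ " and finally " ++ inner ++ " )") (props.getLast h)
    = String.join (props.dropLast.map (fun p => "( " ++ p ++ " and finally "))
      ++ props.getLast h ++ pvClosers (props.length - 1) := by
  induction props with
  | nil => exact absurd rfl h
  | cons p rest ih =>
    cases rest with
    | nil => simp [pvClosers, String.join]
    | cons q rs =>
      have hne : q :: rs ≠ [] := by simp
      rw [List.dropLast_cons_of_ne_nil hne, List.getLast_cons hne,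
        List.reverse_cons, List.foldl_append, List.foldl_cons, List.foldl_nil, ih hne]
      have hlen : (p :: q :: rs).length - 1 = ((q :: rs).length - 1) + 1 := by simp
      rw [hlen]
      simp only [pvClosers, List.map_cons]
      apply String.ext
      simp [String.join, toList_foldl_append]


-- ===== VERDICT (by name: the statement is the Claim_ definition above) =====
theorem fragment_patrol_py_spec : Claim_equal_fragment_patrol_py := by
  intro props _
  unfold Spec_fragment_patrol_py fragment_patrol_py fragment_patrol_py_alt
  match props with
  | [] => rfl
  | [p] => rfl
  | p :: q :: rs =>
    have hne : p :: q :: rs ≠ [] := by simp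
    simp only [if_neg hne]
    have hlen : (p :: q :: rs).length ≠ 1 := by simp
    simp only [if_neg hlen]
    rw [PySem.List.slice_to_neg_one]
    have hget : (PySem.List.pyGet? (p :: q :: rs) (-1)).getD "" = (p :: q :: rs).getLast hne := by
      simp [PySem.List.pyGet?, PySem.List.pyIdx?, List.getLast_eq_getElem]
    rw [hget, fold_eq_join _ hne]
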